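-- pv_equiv track=rewrite | github.com/wells-wood-research/drFrankenstein | Laboratory/Experiments/Protocol_4_Twisting/Twisted_Assistant.py | get_unique_dihedrals
-- ===== SOURCE A (Python) =====
-- def get_unique_dihedrals(dihedralGroup: list[tuple[tuple[str], tuple[str]]]):
--     uniqueDihedrals = {}
--     for dihedralData in dihedralGroup:
--         if dihedralData[0] not in uniqueDihedrals.keys():
--             uniqueDihedrals[dihedralData[0]] = [dihedralData[1]]
--         else:
--             uniqueDihedrals[dihedralData[0]].append(dihedralData[1])
--
--     return uniqueDihedrals
-- ===== SOURCE B (Python) =====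
-- def get_unique_dihedrals(dihedralGroup):
--     keys = dict.fromkeys(first for first, _ in dihedralGroup)
--     return {k: [second for first, second in dihedralGroup if first == k]
--             for k in keys}
-- ===== Notes on version B (the rewrite author's own statement) =====
-- stated objective: idiomatic
-- what changed: B first collects the distinct first-elements in first-occurrence order with dict.fromkeys, then builds the whole dict in one comprehension with a per-key filter pass over the input, instead of A's incremental membership-probe-then-insert/append dict accumulation.
import Mathlib
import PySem

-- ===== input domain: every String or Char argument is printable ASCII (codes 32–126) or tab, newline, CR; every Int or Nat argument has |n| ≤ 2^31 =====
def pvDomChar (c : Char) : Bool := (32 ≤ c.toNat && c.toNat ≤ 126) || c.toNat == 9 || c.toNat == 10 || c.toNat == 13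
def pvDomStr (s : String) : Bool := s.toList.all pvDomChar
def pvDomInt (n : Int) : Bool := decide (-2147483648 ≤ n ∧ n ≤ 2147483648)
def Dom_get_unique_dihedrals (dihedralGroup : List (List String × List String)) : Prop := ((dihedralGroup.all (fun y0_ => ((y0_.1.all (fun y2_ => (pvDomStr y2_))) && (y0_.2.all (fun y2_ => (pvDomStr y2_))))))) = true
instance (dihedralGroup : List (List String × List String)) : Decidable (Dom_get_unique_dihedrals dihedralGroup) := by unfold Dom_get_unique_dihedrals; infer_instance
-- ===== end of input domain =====

-- B groups by first-occurrence distinct keys (dict.fromkeys) with a per-key filter pass instead of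
-- A's incremental membership-probe dict accumulation; objective: idiomatic, not faster.

-- ===== PORT A =====
def get_unique_dihedrals (dihedralGroup : List (List String × List String)) : List (List String × List (List String)) :=
  (dihedralGroup.foldl
    (fun d p =>
      if d.contains p.1 = false then d.insert p.1 [p.2]
      else d.modify p.1 [] (fun l => l ++ [p.2]))
    PySem.Dict.empty).items

-- ===== PORT B =====
def get_unique_dihedrals_alt (dihedralGroup : List (List String × List String)) : List (List String × List (List String)) :=
  let keys := PySem.List.dedup (dihedralGroup.map (fun p => p.1))
  (keys.foldl
    (fun d k => d.insert k ((dihedralGroup.filter (fun p => p.1 == k)).map (fun p => p.2)))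
    PySem.Dict.empty).items

-- ===== PRECONDITION & SPEC =====
def Spec_get_unique_dihedrals (dihedralGroup : List (List String × List String)) (out : List (List String × List (List String))) : Prop := out = get_unique_dihedrals_alt dihedralGroup
instance (dihedralGroup : List (List String × List String)) (out : List (List String × List (List String))) : Decidable (Spec_get_unique_dihedrals dihedralGroup out) := by unfold Spec_get_unique_dihedrals; infer_instance

-- ===== CLAIM (what is proved, stated in full; the proofs are below) =====
def Claim_equal_get_unique_dihedrals : Prop := ∀ (dihedralGroup : List (List String × List String)), Dom_get_unique_dihedrals dihedralGroup → Spec_get_unique_dihedrals dihedralGroup (get_unique_dihedrals dihedralGroup)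

-- ===== LEMMAS AND PROOFS =====

-- A's branch on membership is extensionally a single Dict.modify (append-with-default-[]).
theorem pv_stepA_eq_modify (d : PySem.Dict (List String) (List (List String))) (p : List String × List String) :
    (if d.contains p.1 = false then d.insert p.1 [p.2]
     else d.modify p.1 [] (fun l => l ++ [p.2]))
    = d.modify p.1 [] (fun l => l ++ [p.2]) := by
  by_cases h : d.contains p.1 = false
  · simp only [h, if_true]
    simp [PySem.Dict.modify, PySem.Dict.getD_of_not_contains d ([] : List (List String)) h]
  · simp [h]

theorem pv_foldA_eq (g : List (List String × List String)) :
    g.foldl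
      (fun d p =>
        if d.contains p.1 = false then d.insert p.1 [p.2]
        else d.modify p.1 [] (fun l => l ++ [p.2]))
      PySem.Dict.empty
    = g.foldl (fun d p => d.modify p.1 [] (fun l => l ++ [p.2])) PySem.Dict.empty := by
  exact PySem.List.foldl_congr_mem g _ _ _ (fun d p _ => pv_stepA_eq_modify d p)

-- ===== VERDICT (by name: the statement is the Claim_ definition above) =====
theorem get_unique_dihedrals_spec : Claim_equal_get_unique_dihedrals := by
  intro g _
  unfold Spec_get_unique_dihedrals get_unique_dihedrals get_unique_dihedrals_alt
  rw [pv_foldA_eq]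
  set dA := g.foldl (fun d p => d.modify p.1 [] (fun l => l ++ [p.2])) PySem.Dict.empty with hdA
  have hnodup : dA.keys.Nodup := by
    rw [hdA]
    exact PySem.Dict.nodup_keys_foldl_modify_key g (fun p => p.1) [] (fun d p l => l ++ [p.2]) _ PySem.Dict.nodup_keys_empty
  have hkeys : dA.keys = PySem.List.dedup (g.map (fun p => p.1)) := by
    rw [hdA]
    rw [PySem.Dict.keys_foldl_modify_key]
    simp [PySem.Dict.keys_empty, PySem.Set.update_nil_left, PySem.List.dedup_eq_ofList]
  have hgetD : ∀ k, dA.getD k [] = (g.filter (fun p => p.1 == k)).map (fun p => p.2) := by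
    intro k
    rw [hdA, PySem.Dict.getD_foldl_modify_append]
    simp [PySem.Dict.getD_empty]
  rw [PySem.Dict.items_foldl_insert_fresh (k := fun k => k)]
  · rw [PySem.Dict.items_eq_map_keys dA hnodup []]
    rw [hkeys]
    simp only [PySem.Dict.empty, List.nil_append]
    refine List.map_congr_left ?_
    intro k _
    simp [hgetD k]
  · intro a _; exact PySem.Dict.contains_empty a
  · simp only [List.map_id_fun', id]
    exact PySem.List.nodup_dedup (g.map (fun p => p.1))
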